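-- pv_equiv track=rewrite | github.com/m0hdasif/coding-challenge | string/reverse_words_order.py | reverse_words_order
-- ===== SOURCE A (Python) =====
-- def reverse_words_order(sentence: str) -> str:
--     word = ""
--     reverse_sentence = ""
--     for char in sentence:
--         if char in [" ", ",", "."]:
--             reverse_sentence = f"{char}{word}{reverse_sentence}"
--             word = ""
--         else:
--             word += char
--     reverse_sentence = f"{word}{reverse_sentence}"
--     return reverse_sentence
-- ===== SOURCE B (Python) =====
-- def reverse_words_order(sentence: str) -> str:
--     tokens = []
--     cur = []
--     for ch in sentence:
--         if ch in " ,.":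
--             tokens.append("".join(cur))
--             tokens.append(ch)
--             cur = []
--         else:
--             cur.append(ch)
--     tokens.append("".join(cur))
--     return "".join(reversed(tokens))
-- ===== Notes on version B (the rewrite author's own statement) =====
-- stated objective: faster
-- what changed: B tokenizes the sentence once into an interleaved list of (possibly empty) words and single-char delimiters, then reverses the token list and joins it, instead of A's per-delimiter string-prepending accumulator.
import Mathlib
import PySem

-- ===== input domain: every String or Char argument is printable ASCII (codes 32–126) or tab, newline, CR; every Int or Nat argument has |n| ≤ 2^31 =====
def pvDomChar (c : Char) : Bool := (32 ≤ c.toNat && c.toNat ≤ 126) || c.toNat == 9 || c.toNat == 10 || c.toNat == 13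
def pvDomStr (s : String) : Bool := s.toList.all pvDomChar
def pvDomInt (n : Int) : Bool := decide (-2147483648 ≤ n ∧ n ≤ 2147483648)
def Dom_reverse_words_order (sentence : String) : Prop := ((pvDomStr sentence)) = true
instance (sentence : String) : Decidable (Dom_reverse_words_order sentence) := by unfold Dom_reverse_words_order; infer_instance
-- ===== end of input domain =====

-- B tokenizes into an interleaved word/delimiter token list, reverses and joins it, instead of A's online string-prepending accumulator; equivalence proved on all inputs.


-- ===== PORT A =====
-- state: (word, reverse_sentence) as char lists; delimiter test 'char in [" ", ",", "."]'
def pvDelim (c : Char) : Bool := c = ' ' || c = ',' || c = '.'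

def pvLoopA : List Char → List Char → List Char → List Char
  | [], word, rs => word ++ rs
  | c :: cs, word, rs =>
    if pvDelim c then pvLoopA cs [] (c :: (word ++ rs))
    else pvLoopA cs (word ++ [c]) rs

def reverse_words_order (sentence : String) : String :=
  String.mk (pvLoopA sentence.toList [] [])

-- ===== PORT B =====
-- one-pass tokenizer: interleaved (possibly empty) words and single-char delimiters
def pvTokenize : List Char → List Char → List (List Char)
  | [], cur => [cur]
  | c :: cs, cur =>
    if pvDelim c then cur :: [c] :: pvTokenize cs []
    else pvTokenize cs (cur ++ [c])

def reverse_words_order_alt (sentence : String) : String :=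
  String.mk ((pvTokenize sentence.toList []).reverse.flatten)

-- ===== PRECONDITION & SPEC =====
def Spec_reverse_words_order (sentence : String) (out : String) : Prop := out = reverse_words_order_alt sentence
instance (sentence : String) (out : String) : Decidable (Spec_reverse_words_order sentence out) := by unfold Spec_reverse_words_order; infer_instance

-- ===== CLAIM (what is proved, stated in full; the proofs are below) =====
def Claim_equal_reverse_words_order : Prop := ∀ (sentence : String), Dom_reverse_words_order sentence → Spec_reverse_words_order sentence (reverse_words_order sentence)

-- ===== LEMMAS AND PROOFS =====
theorem pvLoopA_eq_tokenize (cs : List Char) : ∀ (word rs : List Char),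
    pvLoopA cs word rs = (pvTokenize cs word).reverse.flatten ++ rs := by
  induction cs with
  | nil => intro word rs; simp [pvLoopA, pvTokenize]
  | cons c cs ih =>
    intro word rs
    by_cases h : pvDelim c = true
    · simp [pvLoopA, pvTokenize, h, ih]
    · simp [pvLoopA, pvTokenize, h, ih]

-- ===== VERDICT (by name: the statement is the Claim_ definition above) =====
theorem reverse_words_order_spec : Claim_equal_reverse_words_order := by
  intro sentence _
  unfold Spec_reverse_words_order reverse_words_order reverse_words_order_alt
  rw [pvLoopA_eq_tokenize]
  simp
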